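-- pv_equiv track=rewrite | github.com/ijesusjr/prepsense | core/risk_engine.py | weather_id_to_severity
-- ===== SOURCE A (Python) =====
-- _WEATHER_ID_SCORES = {
--     range(200, 300): 35,   # Thunderstorm
--     range(300, 400): 10,   # Drizzle
--     range(600, 700): 25,   # Snow
--     range(700, 800): 15,   # Atmosphere (fog, smoke, tornado group)
--     range(800, 900): 0,    # Clear / clouds
-- }
--
-- _RAIN_ID_SCORES = {
--     500: 15,   # Light rain
--     501: 20,   # Moderate rain
--     502: 30,   # Heavy intensity rain
--     503: 35,   # Very heavy rain
--     504: 40,   # Extreme rain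
--     511: 25,   # Freezing rain
-- }
--
-- _TORNADO_ID = 781
--
-- def weather_id_to_severity(weather_id: int) -> int:
--     """
--     Convert an OWM weather condition ID to a base severity score (0-40).
--
--     Args:
--         weather_id: OWM weather condition code.
--
--     Returns:
--         Integer score between 0 and 40.
--     """
--     if weather_id == _TORNADO_ID:
--         return 40
--
--     if 500 <= weather_id <= 599:
--         return _RAIN_ID_SCORES.get(weather_id, 20)
--
--     for id_range, score in _WEATHER_ID_SCORES.items():
--         if weather_id in id_range:
--             return score
--
--     return 0
-- ===== SOURCE B (Python) =====
-- def weather_id_to_severity(weather_id: int) -> int: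
--     """Convert an OWM weather condition ID to a base severity score (0-40)."""
--     if weather_id == 781:
--         return 40
--     if 500 <= weather_id <= 599:
--         if weather_id <= 504:
--             return (15, 20, 30, 35, 40)[weather_id - 500]
--         return 25 if weather_id == 511 else 20
--     # binary search for the segment containing weather_id
--     bounds = (200, 300, 400, 600, 700, 800, 900)
--     scores = (0, 35, 10, 0, 25, 15, 0, 0)
--     lo, hi = 0, 7
--     while lo < hi:
--         mid = (lo + hi) // 2
--         if bounds[mid] <= weather_id:
--             lo = mid + 1
--         else:
--             hi = mid
--     return scores[lo]
-- ===== Notes on version B (the rewrite author's own statement) =====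
-- stated objective: alternative
-- what changed: B drops both dicts and the linear range scan: the small rain-id table is read by arithmetic tuple indexing, and the hundreds-band score is found by a hand-written binary search over sorted segment boundaries instead of scanning range objects.
import Mathlib
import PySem

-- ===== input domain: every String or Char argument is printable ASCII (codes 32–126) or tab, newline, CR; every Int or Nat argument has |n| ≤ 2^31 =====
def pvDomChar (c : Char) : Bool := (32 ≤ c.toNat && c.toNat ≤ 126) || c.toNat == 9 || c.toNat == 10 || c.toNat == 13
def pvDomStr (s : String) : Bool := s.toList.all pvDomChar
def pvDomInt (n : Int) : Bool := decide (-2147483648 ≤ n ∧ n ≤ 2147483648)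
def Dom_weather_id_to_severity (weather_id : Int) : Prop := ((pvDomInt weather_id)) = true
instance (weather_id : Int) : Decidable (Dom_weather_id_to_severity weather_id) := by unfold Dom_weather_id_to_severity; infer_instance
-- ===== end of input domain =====

-- B replaces A's dict lookups and linear range scan by a tuple-indexed rain table and a
-- binary search over sorted segment boundaries (objective: alternative).

-- ===== PORT A =====
-- _WEATHER_ID_SCORES: dict keyed by range(lo, hi); items() order is insertion order
def weatherIdScoresA : List ((Int × Int) × Int) :=
  [((200, 300), 35), ((300, 400), 10), ((600, 700), 25), ((700, 800), 15), ((800, 900), 0)]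

-- _RAIN_ID_SCORES as a PySem.Dict
def rainIdScoresA : PySem.Dict Int Int := PySem.Dict.mk [(500, 15), (501, 20), (502, 30), (503, 35), (504, 40), (511, 25)]

-- the 'for id_range, score in _WEATHER_ID_SCORES.items(): if weather_id in id_range: return score' loop
def scanRangesA (weather_id : Int) : List ((Int × Int) × Int) → Int
  | [] => 0
  | ((lo, hi), s) :: rest =>
      if lo ≤ weather_id ∧ weather_id < hi then s else scanRangesA weather_id rest

def weather_id_to_severity (weather_id : Int) : Int :=
  if weather_id = 781 then 40
  else if 500 ≤ weather_id ∧ weather_id ≤ 599 then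
    PySem.Dict.getD rainIdScoresA weather_id 20
  else
    scanRangesA weather_id weatherIdScoresA

-- ===== PORT B =====
def rainTupleB : List Int := [15, 20, 30, 35, 40]
def boundsB : List Int := [200, 300, 400, 600, 700, 800, 900]
def scoresB : List Int := [0, 35, 10, 0, 25, 15, 0, 0]

-- the 'while lo < hi' binary-search loop; the bounds[mid] index is always in range
def bsB (weather_id : Int) (lo hi : Nat) : Nat :=
  if lo < hi then
    let mid := (lo + hi) / 2
    if (PySem.List.pyGet? boundsB (Int.ofNat mid)).getD 0 ≤ weather_id then
      bsB weather_id (mid + 1) hi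
    else
      bsB weather_id lo mid
  else lo
termination_by hi - lo
decreasing_by all_goals omega

def weather_id_to_severity_alt (weather_id : Int) : Int :=
  if weather_id = 781 then 40
  else if 500 ≤ weather_id ∧ weather_id ≤ 599 then
    -- (15, 20, 30, 35, 40)[weather_id - 500]; the index is always in range here
    if weather_id ≤ 504 then (PySem.List.pyGet? rainTupleB (weather_id - 500)).getD 0
    else if weather_id = 511 then 25 else 20
  else
    -- scores[lo]; bsB returns a value in 0..7
    (PySem.List.pyGet? scoresB (Int.ofNat (bsB weather_id 0 7))).getD 0

-- ===== PRECONDITION & SPEC =====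
def Spec_weather_id_to_severity (weather_id : Int) (out : Int) : Prop := out = weather_id_to_severity_alt weather_id
instance (weather_id : Int) (out : Int) : Decidable (Spec_weather_id_to_severity weather_id out) := by unfold Spec_weather_id_to_severity; infer_instance

-- ===== CLAIM (what is proved, stated in full; the proofs are below) =====
def Claim_equal_weather_id_to_severity : Prop := ∀ (weather_id : Int), Dom_weather_id_to_severity weather_id → Spec_weather_id_to_severity weather_id (weather_id_to_severity weather_id)

-- ===== LEMMAS AND PROOFS =====
theorem bsB_lt (id : Int) (h : id < 200) : bsB id 0 7 = 0 := by
  simp [bsB, boundsB, PySem.List.pyGet?, PySem.List.pyIdx?]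
  split_ifs <;> omega

theorem bsB_200 (id : Int) (h1 : 200 ≤ id) (h2 : id < 300) : bsB id 0 7 = 1 := by
  simp [bsB, boundsB, PySem.List.pyGet?, PySem.List.pyIdx?]
  split_ifs <;> omega

theorem bsB_300 (id : Int) (h1 : 300 ≤ id) (h2 : id < 400) : bsB id 0 7 = 2 := by
  simp [bsB, boundsB, PySem.List.pyGet?, PySem.List.pyIdx?]
  split_ifs <;> omega

theorem bsB_400 (id : Int) (h1 : 400 ≤ id) (h2 : id < 600) : bsB id 0 7 = 3 := by
  simp [bsB, boundsB, PySem.List.pyGet?, PySem.List.pyIdx?]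
  split_ifs <;> omega

theorem bsB_600 (id : Int) (h1 : 600 ≤ id) (h2 : id < 700) : bsB id 0 7 = 4 := by
  simp [bsB, boundsB, PySem.List.pyGet?, PySem.List.pyIdx?]
  split_ifs <;> omega

theorem bsB_700 (id : Int) (h1 : 700 ≤ id) (h2 : id < 800) : bsB id 0 7 = 5 := by
  simp [bsB, boundsB, PySem.List.pyGet?, PySem.List.pyIdx?]
  split_ifs <;> omega

theorem bsB_800 (id : Int) (h1 : 800 ≤ id) (h2 : id < 900) : bsB id 0 7 = 6 := by
  simp [bsB, boundsB, PySem.List.pyGet?, PySem.List.pyIdx?]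
  split_ifs <;> omega

theorem bsB_900 (id : Int) (h1 : 900 ≤ id) : bsB id 0 7 = 7 := by
  simp [bsB, boundsB, PySem.List.pyGet?, PySem.List.pyIdx?]
  split_ifs <;> omega

-- ===== VERDICT (by name: the statement is the Claim_ definition above) =====
theorem weather_id_to_severity_spec : Claim_equal_weather_id_to_severity := by
  intro id _
  unfold Spec_weather_id_to_severity weather_id_to_severity weather_id_to_severity_alt
  split_ifs with h781 hrain h504 h511
  · rfl
  · -- rain ids 500..504: dict lookup equals tuple index
    obtain ⟨hl, _⟩ := hrain
    interval_cases id <;> decide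
  · subst h511; decide
  · -- rain ids 505..599 other than 511: dict lookup misses
    obtain ⟨_, hr⟩ := hrain
    have m0 : ((500:Int) == id) = false := by simp; omega
    have m1 : ((501:Int) == id) = false := by simp; omega
    have m2 : ((502:Int) == id) = false := by simp; omega
    have m3 : ((503:Int) == id) = false := by simp; omega
    have m4 : ((504:Int) == id) = false := by simp; omega
    have m5 : ((511:Int) == id) = false := by simp; omega
    simp [rainIdScoresA, PySem.Dict.getD, PySem.Dict.get?, List.find?, m0, m1, m2, m3, m4, m5]
  · -- non-rain, non-tornado: range scan equals binary search
    simp only [scanRangesA, weatherIdScoresA]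
    split_ifs with h1 h2 h3 h4 h5
    · rw [bsB_200 id (by omega) (by omega)]; decide
    · rw [bsB_300 id (by omega) (by omega)]; decide
    · rw [bsB_600 id (by omega) (by omega)]; decide
    · rw [bsB_700 id (by omega) (by omega)]; decide
    · rw [bsB_800 id (by omega) (by omega)]; decide
    · -- remaining: id < 200, 400 ≤ id < 500, or id ≥ 900
      rcases lt_or_ge id 200 with hc | hc
      · rw [bsB_lt id hc]; decide
      · rcases lt_or_ge id 900 with hd | hd
        · rw [bsB_400 id (by omega) (by omega)]; decide
        · rw [bsB_900 id hd]; decide
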